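/- GENERATED by farm/mkstatement.py from design/units.tsv (unit `start_decoder.R14f`) and the assertions of Vorbis/Spec/StartDecoderR14.lean — do not edit.
   THE STATEMENT of the proof unit `start_decoder.R14f`: segment R14f of `start_decoder` (12 instructions; entries 0x1165f4;
   exits 0x113b22; ranges 0x1165f4-0x116601 + 0x116616-0x116623 + 0x116641-0x11664e)
   takes each of its entry assertions to one of its exit assertions (`Vorbis.Spec.StartDecoder.SegR14f`), given the contracts of its callees.
   What the names mean: Vorbis/Spec/Basic.lean (the shared hypotheses), Vorbis/Spec/StartDecoderR14.lean (the assertions). The theorem to prove: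
   `theorem start_decoder_R14f_ok : Vorbis.Spec.start_decoder_R14f.Statement`. -/
import Vorbis.Spec.Leaves
import Vorbis.Spec.StartDecoderR14
namespace Vorbis.Spec.start_decoder_R14f
open X86 X86.User Asan

/-- The statement of unit `start_decoder.R14f`. -/
def Statement : Prop :=
  ∀ (Lay : Layout) (_hLay : Lay.hi = 0x1000000) (μ : Microarch) (_hμ : UserX.MicroOK μ) (u₀ : State)
    (_hcode : HasCodeNat Lay u₀ Vorbis.L.start_decoder.entry Vorbis.Code.code_start_decoder.nat Vorbis.L.start_decoder.size)
    (_h_error : ∀ (others : List Obj) (frames : List (Nat × FrameLayout)), Calls Lay μ Vorbis.WayInv (Vorbis.conv u₀) Vorbis.L.error.entry (Vorbis.Spec.error.spec others frames)),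
    Vorbis.Spec.StartDecoder.SegR14f Lay μ u₀

end Vorbis.Spec.start_decoder_R14f
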